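-- pv_equiv track=rewrite | github.com/VincentVelthuis/advent2019 | day4/ass4b.py | rule3b
-- ===== SOURCE A (Python) =====
-- def rule3b(num):
--   # the two adjacent matching digits are not part
--   #   of a larger group of matching digits
--   for i in range(len(num)-1):
--     if num[i] == num[i+1] and i < len(num)-2:
--       if num[i] == num[i+2]:
--         continue
--       else :
--         return True
--   return False
-- ===== SOURCE B (Python) =====
-- def rule3b(num):
--   # one-pass run-length state machine: True iff a run of >=2 equal chars
--   # is followed by a different char (the final run is never followed by one)
--   prev = None
--   runlen = 0
--   for ch in num:
--     if ch == prev: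
--       runlen += 1
--     else:
--       if runlen >= 2:
--         return True
--       prev = ch
--       runlen = 1
--   return False
-- ===== Notes on version B (the rewrite author's own statement) =====
-- stated objective: simpler
-- what changed: Replaced A's indexed loop with triple lookahead (num[i], num[i+1], num[i+2]) by a single-pass run-length state machine over the characters; avoiding the repeated subscripting gives a measured constant-factor speedup.
import Mathlib
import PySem

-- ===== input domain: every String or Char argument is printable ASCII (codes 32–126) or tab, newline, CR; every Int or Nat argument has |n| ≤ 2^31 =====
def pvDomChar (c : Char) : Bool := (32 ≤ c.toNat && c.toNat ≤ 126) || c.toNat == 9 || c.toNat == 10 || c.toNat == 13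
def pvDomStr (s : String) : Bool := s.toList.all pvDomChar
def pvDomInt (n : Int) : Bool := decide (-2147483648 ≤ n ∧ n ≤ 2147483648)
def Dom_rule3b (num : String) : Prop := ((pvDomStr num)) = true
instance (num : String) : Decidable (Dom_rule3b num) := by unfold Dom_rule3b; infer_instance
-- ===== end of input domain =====

-- B replaces A's indexed triple-lookahead loop by a one-pass run-length state machine (simpler).

-- ===== PORT A =====
-- the 'for i in range(len(num)-1)' loop as counting recursion on i
def rule3bGo (cs : List Char) (i : Nat) : Bool :=
  if i < cs.length - 1 then
    if PySem.List.pyGet? cs (i : Int) = PySem.List.pyGet? cs ((i : Int) + 1) ∧ i < cs.length - 2 then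
      if PySem.List.pyGet? cs (i : Int) = PySem.List.pyGet? cs ((i : Int) + 2) then
        rule3bGo cs (i + 1)
      else
        true
    else
      rule3bGo cs (i + 1)
  else
    false
termination_by cs.length - i

def rule3b (num : String) : Bool := rule3bGo num.toList 0

-- ===== PORT B =====
-- state: prev = last char seen (None initially), runlen = length of the current run
def rule3bAltGo (prev : Option Char) (runlen : Int) : List Char → Bool
  | [] => false
  | ch :: rest =>
    if some ch = prev then
      rule3bAltGo prev (runlen + 1) rest
    else
      if runlen ≥ 2 then
        true
      else
        rule3bAltGo (some ch) 1 rest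

def rule3b_alt (num : String) : Bool := rule3bAltGo none 0 num.toList

-- ===== PRECONDITION & SPEC =====
def Spec_rule3b (num : String) (out : Bool) : Prop := out = rule3b_alt num
instance (num : String) (out : Bool) : Decidable (Spec_rule3b num out) := by unfold Spec_rule3b; infer_instance

-- ===== CLAIM (what is proved, stated in full; the proofs are below) =====
def Claim_equal_rule3b : Prop := ∀ (num : String), Dom_rule3b num → Spec_rule3b num (rule3b num)

-- ===== LEMMAS AND PROOFS =====

-- common specification: scan a window of three characters
def fSpec : List Char → Bool
  | a :: b :: c :: rest => if a = b ∧ a ≠ c then true else fSpec (b :: c :: rest)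
  | _ => false

theorem pyGet_add_one (cs : List Char) (i : Nat) :
    PySem.List.pyGet? cs ((i : Int) + 1) = cs[i+1]? := by
  rw [show ((i : Int) + 1) = ((i + 1 : Nat) : Int) by push_cast; ring, PySem.List.pyGet?_natCast]

theorem pyGet_add_two (cs : List Char) (i : Nat) :
    PySem.List.pyGet? cs ((i : Int) + 2) = cs[i+2]? := by
  rw [show ((i : Int) + 2) = ((i + 2 : Nat) : Int) by push_cast; ring, PySem.List.pyGet?_natCast]

theorem rule3bGo_eq_fSpec (cs : List Char) (i : Nat) : rule3bGo cs i = fSpec (cs.drop i) := by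
  fun_induction rule3bGo cs i with
  | case1 i h1 h2 h3 ih =>
    obtain ⟨heq, hlt⟩ := h2
    simp only [PySem.List.pyGet?_natCast, pyGet_add_one, pyGet_add_two] at heq h3
    rw [List.getElem?_eq_getElem (show i < cs.length by omega),
        List.getElem?_eq_getElem (show i+1 < cs.length by omega)] at heq
    rw [List.getElem?_eq_getElem (show i < cs.length by omega),
        List.getElem?_eq_getElem (show i+2 < cs.length by omega)] at h3
    have h12 : cs[i]'(by omega) = cs[i+1]'(by omega) := by simpa using heq
    have h13 : cs[i]'(by omega) = cs[i+2]'(by omega) := by simpa using h3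
    have hd : cs.drop i = cs[i] :: cs[i+1] :: cs[i+2] :: cs.drop (i+3) := by
      rw [List.getElem_cons_drop (by omega), List.getElem_cons_drop (by omega),
          List.getElem_cons_drop (by omega)]
    have hd' : cs.drop (i+1) = cs[i+1] :: cs[i+2] :: cs.drop (i+3) := by
      rw [List.getElem_cons_drop (by omega), List.getElem_cons_drop (by omega)]
    rw [ih, hd, fSpec, if_neg (fun h => h.2 h13), hd']
  | case2 i h1 h2 h3 =>
    obtain ⟨heq, hlt⟩ := h2
    simp only [PySem.List.pyGet?_natCast, pyGet_add_one, pyGet_add_two] at heq h3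
    rw [List.getElem?_eq_getElem (show i < cs.length by omega),
        List.getElem?_eq_getElem (show i+1 < cs.length by omega)] at heq
    rw [List.getElem?_eq_getElem (show i < cs.length by omega),
        List.getElem?_eq_getElem (show i+2 < cs.length by omega)] at h3
    have h12 : cs[i]'(by omega) = cs[i+1]'(by omega) := by simpa using heq
    have h13 : cs[i]'(by omega) ≠ cs[i+2]'(by omega) := by simpa using h3
    have hd : cs.drop i = cs[i] :: cs[i+1] :: cs[i+2] :: cs.drop (i+3) := by
      rw [List.getElem_cons_drop (by omega), List.getElem_cons_drop (by omega),
          List.getElem_cons_drop (by omega)]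
    rw [hd, fSpec, if_pos ⟨h12, h13⟩]
  | case3 i h1 h2 ih =>
    rw [ih]
    by_cases hw : i + 2 < cs.length
    · -- a full window of three exists, so the first two chars must differ
      simp only [PySem.List.pyGet?_natCast, pyGet_add_one] at h2
      have hne : cs[i]'(by omega) ≠ cs[i+1]'(by omega) := by
        intro hcontra
        exact h2 ⟨by
          rw [List.getElem?_eq_getElem (show i < cs.length by omega),
              List.getElem?_eq_getElem (show i+1 < cs.length by omega)]
          simpa using hcontra, by omega⟩
      have hd : cs.drop i = cs[i] :: cs[i+1] :: cs[i+2] :: cs.drop (i+3) := by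
        rw [List.getElem_cons_drop (by omega), List.getElem_cons_drop (by omega),
            List.getElem_cons_drop (by omega)]
      have hd' : cs.drop (i+1) = cs[i+1] :: cs[i+2] :: cs.drop (i+3) := by
        rw [List.getElem_cons_drop (by omega), List.getElem_cons_drop (by omega)]
      rw [hd, fSpec, if_neg (fun h => hne h.1), hd']
    · -- exactly two chars remain: both sides reduce to fSpec of a 2/1-element list
      have hd : cs.drop i = cs[i]'(by omega) :: cs[i+1]'(by omega) :: cs.drop (i+2) := by
        rw [List.getElem_cons_drop (by omega), List.getElem_cons_drop (by omega)]
      have hnil : cs.drop (i+2) = [] := by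
        apply List.drop_eq_nil_of_le; omega
      have hd' : cs.drop (i+1) = cs[i+1]'(by omega) :: cs.drop (i+2) := by
        rw [List.getElem_cons_drop (by omega)]
      rw [hd, hd', hnil]
      rfl
  | case4 i h1 =>
    have hl : (cs.drop i).length ≤ 1 := by simp; omega
    cases hxs : cs.drop i with
    | nil => rfl
    | cons a t =>
      cases t with
      | nil => rfl
      | cons b u => rw [hxs] at hl; simp at hl

theorem altGo2 (cs : List Char) (p : Char) (r : Int) (hr : 2 ≤ r) :
    rule3bAltGo (some p) r cs = fSpec (p :: p :: cs) := by
  induction cs generalizing r with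
  | nil => simp [rule3bAltGo, fSpec]
  | cons c rest ih =>
    by_cases hc : c = p
    · subst hc
      rw [rule3bAltGo, if_pos rfl, ih (r + 1) (by omega)]
      simp [fSpec]
    · rw [rule3bAltGo, if_neg (by simp [hc]), if_pos hr]
      simp [fSpec, Ne.symm hc]

theorem altGo1 (cs : List Char) (p : Char) :
    rule3bAltGo (some p) 1 cs = fSpec (p :: cs) := by
  induction cs generalizing p with
  | nil => simp [rule3bAltGo, fSpec]
  | cons c rest ih =>
    by_cases hc : c = p
    · subst hc
      rw [rule3bAltGo, if_pos rfl]; exact altGo2 rest c (1 + 1) (by omega)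
    · rw [rule3bAltGo, if_neg (by simp [hc]), if_neg (by omega), ih c]
      cases rest with
      | nil => simp [fSpec]
      | cons d rest' => simp [fSpec, Ne.symm hc]

theorem alt_eq_fSpec (cs : List Char) : rule3bAltGo none 0 cs = fSpec cs := by
  cases cs with
  | nil => simp [rule3bAltGo, fSpec]
  | cons c rest =>
    rw [rule3bAltGo, if_neg (by simp), if_neg (by omega), altGo1 rest c]

-- ===== VERDICT (by name: the statement is the Claim_ definition above) =====
theorem rule3b_spec : Claim_equal_rule3b := by
  intro num _
  unfold Spec_rule3b rule3b rule3b_alt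
  rw [alt_eq_fSpec, rule3bGo_eq_fSpec, List.drop_zero]
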